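-- pv_equiv track=rewrite | github.com/escobarflughafen/GraphQLer2022 | dependency_test.py | get_query_list
-- ===== SOURCE A (Python) =====
-- def get_query_list(data_json, data_type):
--
--     # Get lists of query name.
--     query_name = ["messages", "getMessage"]   # TODO: work on the function to get all query name later.
--
--     query_list = []
--     for qn in query_name:
--         for d in data_json:
--             if d['name'] == qn:
--                 query_list.append(d)
--
--     return query_list
-- ===== SOURCE B (Python) =====
-- def get_query_list(data_json, data_type):
--     # One pass: partition entries into the two fixed query groups, then concatenate.
--     msgs = []
--     gets = []
--     for d in data_json:
--         name = d['name']
--         if name == "messages":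
--             msgs.append(d)
--         elif name == "getMessage":
--             gets.append(d)
--     return msgs + gets
-- ===== Notes on version B (the rewrite author's own statement) =====
-- stated objective: simpler
-- what changed: Single pass over data_json partitioning entries into the two fixed-name groups (two accumulators), concatenated at the end, instead of re-scanning the whole list once per query name.
import Mathlib
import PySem

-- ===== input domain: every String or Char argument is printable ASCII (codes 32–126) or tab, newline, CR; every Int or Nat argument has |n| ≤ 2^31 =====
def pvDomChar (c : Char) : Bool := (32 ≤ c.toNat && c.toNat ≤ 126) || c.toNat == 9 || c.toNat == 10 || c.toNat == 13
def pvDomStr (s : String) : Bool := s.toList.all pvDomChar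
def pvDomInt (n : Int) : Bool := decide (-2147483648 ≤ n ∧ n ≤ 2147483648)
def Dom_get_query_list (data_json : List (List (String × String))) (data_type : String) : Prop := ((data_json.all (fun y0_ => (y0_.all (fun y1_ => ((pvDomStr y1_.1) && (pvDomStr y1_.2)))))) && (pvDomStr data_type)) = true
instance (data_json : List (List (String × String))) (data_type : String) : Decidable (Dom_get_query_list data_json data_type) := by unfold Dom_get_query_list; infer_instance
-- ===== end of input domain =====

-- ===== PORT A =====
-- B changes only structure (one pass, two accumulators vs two scans); return values proved equal on Pre_.
-- dict lookup d['name'] on an association list: first matching key; none = KeyError (excluded by Pre_).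
def pvLookup (d : List (String × String)) (k : String) : Option String :=
  (d.find? (fun p => p.1 == k)).map (fun p => p.2)

def get_query_list (data_json : List (List (String × String))) (data_type : String) : List (List (String × String)) :=
  let query_name : List String := ["messages", "getMessage"]
  query_name.foldl
    (fun query_list qn =>
      data_json.foldl
        (fun query_list d =>
          if pvLookup d "name" = some qn then query_list ++ [d] else query_list)
        query_list)
    []

-- ===== PORT B =====
def get_query_list_alt (data_json : List (List (String × String))) (data_type : String) : List (List (String × String)) :=
  let p := data_json.foldl
    (fun (acc : List (List (String × String)) × List (List (String × String))) d =>
      match pvLookup d "name" with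
      | some name =>
        if name = "messages" then (acc.1 ++ [d], acc.2)
        else if name = "getMessage" then (acc.1, acc.2 ++ [d])
        else acc
      | none => acc)
    ([], [])
  p.1 ++ p.2

-- ===== PRECONDITION & SPEC =====
-- Pre_ excludes entries without a 'name' key, on which Python A (and B) raise KeyError.
def Pre_get_query_list (data_json : List (List (String × String))) (data_type : String) : Prop :=
  ∀ d ∈ data_json, (pvLookup d "name").isSome
instance (data_json : List (List (String × String))) (data_type : String) : Decidable (Pre_get_query_list data_json data_type) := by unfold Pre_get_query_list; infer_instance

def pvWitness_get_query_list : (List (List (String × String))) × String :=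
  ([[("name", "messages"), ("v", "1")], [("name", "x")], [("name", "getMessage")]], "q")

def Spec_get_query_list (data_json : List (List (String × String))) (data_type : String) (out : List (List (String × String))) : Prop := out = get_query_list_alt data_json data_type
instance (data_json : List (List (String × String))) (data_type : String) (out : List (List (String × String))) : Decidable (Spec_get_query_list data_json data_type out) := by unfold Spec_get_query_list; infer_instance

-- ===== CLAIM (what is proved, stated in full; the proofs are below) =====
def Claim_equal_get_query_list : Prop := ∀ (data_json : List (List (String × String))) (data_type : String), Dom_get_query_list data_json data_type → Pre_get_query_list data_json data_type → Spec_get_query_list data_json data_type (get_query_list data_json data_type)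

-- ===== LEMMAS AND PROOFS =====

-- A's inner scan over data_json for one query name is accumulator ++ filter.
theorem pvA_scan (qn : String) (xs : List (List (String × String))) (ql : List (List (String × String))) :
    xs.foldl (fun query_list d => if pvLookup d "name" = some qn then query_list ++ [d] else query_list) ql
      = ql ++ xs.filter (fun d => decide (pvLookup d "name" = some qn)) := by
  induction xs generalizing ql with
  | nil => simp
  | cons x xs ih =>
    simp only [List.foldl_cons, List.filter_cons]
    by_cases h : pvLookup x "name" = some qn
    · simp [h, ih]
    · simp [h, ih]

-- B's single pass extends both accumulators by the respective filters.
theorem pvB_scan (xs : List (List (String × String)))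
    (a b : List (List (String × String))) :
    xs.foldl
      (fun (acc : List (List (String × String)) × List (List (String × String))) d =>
        match pvLookup d "name" with
        | some name =>
          if name = "messages" then (acc.1 ++ [d], acc.2)
          else if name = "getMessage" then (acc.1, acc.2 ++ [d])
          else acc
        | none => acc)
      (a, b)
      = (a ++ xs.filter (fun d => decide (pvLookup d "name" = some "messages")),
         b ++ xs.filter (fun d => decide (pvLookup d "name" = some "getMessage"))) := by
  induction xs generalizing a b with
  | nil => simp
  | cons x xs ih =>
    simp only [List.foldl_cons, List.filter_cons]
    cases h : pvLookup x "name" with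
    | none => simp [h, ih]
    | some name =>
      by_cases h1 : name = "messages"
      · subst h1; simp [h, ih]
      · by_cases h2 : name = "getMessage"
        · subst h2; simp [h1, ih]
        · simp [h1, h2, ih]

-- ===== VERDICT (by name: the statement is the Claim_ definition above) =====
theorem get_query_list_spec : Claim_equal_get_query_list := by
  intro data_json data_type _ _
  unfold Spec_get_query_list get_query_list get_query_list_alt
  simp only [List.foldl_cons, List.foldl_nil, pvA_scan, pvB_scan, List.nil_append]
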